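-- pv_equiv track=rewrite | github.com/SmartDocQ/SmartDocQ | backend/main.py | split_sheet_sections
-- ===== SOURCE A (Python) =====
-- def split_sheet_sections(text: str):
--     """Split text into sections by lines that start with '# Sheet: <name>'.
--     Returns list of tuples (sheet_name, content_str). If no markers found, returns [(None, text)].
--     """
--     lines = (text or "").splitlines()
--     sections = []
--     current_name = None
--     current_lines = []
--     found = False
--     for ln in lines:
--         if ln.startswith("# Sheet: "):
--             found = True
--             if current_lines:
--                 sections.append((current_name, "\n".join(current_lines).strip()))
--                 current_lines = []
--             current_name = ln[len("# Sheet: "):].strip() or None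
--         else:
--             current_lines.append(ln)
--     if current_lines:
--         sections.append((current_name, "\n".join(current_lines).strip()))
--     if not found:
--         return [(None, text or "")]
--     return [(name, body) for (name, body) in sections if (body or "").strip()]
-- ===== SOURCE B (Python) =====
-- MARK = "# Sheet: "
--
-- def _sections(name, lines):
--     """Sections of `lines` headed (in the output) by `name`, one recursive step per marker."""
--     i = 0
--     while i < len(lines) and not lines[i].startswith(MARK):
--         i += 1
--     body = "\n".join(lines[:i]).strip()
--     head = [(name, body)] if body else []
--     if i == len(lines):
--         return head
--     nm = lines[i][len(MARK):].strip() or None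
--     return head + _sections(nm, lines[i + 1:])
--
-- def split_sheet_sections(text: str):
--     lines = (text or "").splitlines()
--     if not any(ln.startswith(MARK) for ln in lines):
--         return [(None, text or "")]
--     return _sections(None, lines)
-- ===== Notes on version B (the rewrite author's own statement) =====
-- stated objective: alternative
-- what changed: A threads one fold over all lines with mutable state (sections, current_name, current_lines, found) plus a final flush and a trailing blank-body filter; B finds the marker positions and recurses marker-to-marker, slicing each section body out directly and emitting only non-blank bodies inline.
import Mathlib
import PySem

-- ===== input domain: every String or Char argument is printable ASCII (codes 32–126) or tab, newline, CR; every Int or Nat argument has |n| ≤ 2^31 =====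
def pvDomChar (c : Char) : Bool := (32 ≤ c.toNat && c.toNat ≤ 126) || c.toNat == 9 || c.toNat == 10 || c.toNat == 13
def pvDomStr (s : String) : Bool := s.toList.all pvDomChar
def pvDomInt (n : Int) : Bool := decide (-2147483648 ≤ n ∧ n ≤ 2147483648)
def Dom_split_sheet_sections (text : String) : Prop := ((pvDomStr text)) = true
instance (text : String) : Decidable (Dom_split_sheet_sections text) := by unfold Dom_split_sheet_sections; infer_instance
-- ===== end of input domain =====

-- ===== PORT A =====
-- Port of A: one fold over the lines with state (sections, current_name, current_lines, found),
-- a final flush, and a trailing filter of blank bodies.  B instead recurses marker-to-marker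
-- (same return value; objective: a different decomposition, not speed).
def pvFlushA (secs : List (Option String × String)) (nm : Option String) (cur : List String) :
    List (Option String × String) :=
  if cur ≠ [] then secs ++ [(nm, PySem.Str.strip (PySem.Str.join "\n" cur))] else secs

def pvStepA (st : List (Option String × String) × Option String × List String × Bool)
    (ln : String) : List (Option String × String) × Option String × List String × Bool :=
  if PySem.Str.startswith ln "# Sheet: " then
    let n := PySem.Str.strip (PySem.Str.slice ln (some 9) none)
    (pvFlushA st.1 st.2.1 st.2.2.1, if n = "" then none else some n, [], true)
  else (st.1, st.2.1, st.2.2.1 ++ [ln], st.2.2.2)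

def split_sheet_sections (text : String) : List (Option String × String) :=
  let lines := PySem.Str.splitlines text
  let st := lines.foldl pvStepA ([], none, [], false)
  let secs := pvFlushA st.1 st.2.1 st.2.2.1
  if st.2.2.2 = false then [(none, text)]
  else secs.filter (fun p => decide (PySem.Str.strip p.2 ≠ ""))

-- ===== PORT B =====
def pvIsMarker (ln : String) : Bool := PySem.Str.startswith ln "# Sheet: "

def pvParseName (ln : String) : Option String :=
  let n := PySem.Str.strip (PySem.Str.slice ln (some 9) none)
  if n = "" then none else some n

-- Source B's `_sections`: the while loop computes the index of the first marker, i.e. the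
-- takeWhile/dropWhile split of `lines` at the first marker line; then one recursive call.
def pvSections (name : Option String) (lines : List String) : List (Option String × String) :=
  let pre := lines.takeWhile (fun ln => !pvIsMarker ln)      -- lines[:i]
  let body := PySem.Str.strip (PySem.Str.join "\n" pre)
  let head := if body ≠ "" then [(name, body)] else []
  match h : lines.dropWhile (fun ln => !pvIsMarker ln) with  -- lines[i:]
  | [] => head
  | mline :: tail => head ++ pvSections (pvParseName mline) tail
termination_by lines.length
decreasing_by
  have hle := List.length_dropWhile_le (fun ln => !pvIsMarker ln) lines
  rw [h] at hle
  simp at hle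
  omega

def split_sheet_sections_alt (text : String) : List (Option String × String) :=
  let lines := PySem.Str.splitlines text
  if !(lines.any pvIsMarker) then [(none, text)]
  else pvSections none lines

-- ===== PRECONDITION & SPEC =====
def Spec_split_sheet_sections (text : String) (out : List (Option String × String)) : Prop := out = split_sheet_sections_alt text
instance (text : String) (out : List (Option String × String)) : Decidable (Spec_split_sheet_sections text out) := by unfold Spec_split_sheet_sections; infer_instance

-- ===== CLAIM =====
def Claim_equal_split_sheet_sections : Prop := ∀ (text : String), Dom_split_sheet_sections text → Spec_split_sheet_sections text (split_sheet_sections text)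

-- ===== LEMMAS AND PROOFS =====
-- Python's str.strip is idempotent (lstrip leaves no leading space; rstrip keeps the head).
theorem pv_chars_strip_idem (cs : List Char) :
    PySem.Chars.strip (PySem.Chars.strip cs) = PySem.Chars.strip cs := by
  unfold PySem.Chars.strip PySem.Chars.lstrip PySem.Chars.rstrip
  set p := PySem.Chars.isspace
  set t := List.dropWhile p cs with ht
  have hpre : ((List.dropWhile p t.reverse).reverse).IsPrefix t := by
    have := (List.dropWhile_suffix (l := t.reverse) p).reverse
    simpa using this
  have hls : List.dropWhile p ((List.dropWhile p t.reverse).reverse) = (List.dropWhile p t.reverse).reverse := by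
    cases hr : (List.dropWhile p t.reverse).reverse with
    | nil => simp
    | cons x xs =>
      have hxt : ∃ ys, t = x :: ys := by
        rcases hpre with ⟨suf, hsuf⟩
        rw [hr] at hsuf
        exact ⟨xs ++ suf, by simp [← hsuf]⟩
      rcases hxt with ⟨ys, hys⟩
      have hxf : p x = false := by
        have h1 : List.dropWhile p cs ≠ [] := by rw [← ht, hys]; simp
        have hh := List.head_dropWhile_not (l := cs) (p := p) h1
        have h2 : (List.dropWhile p cs).head h1 = x := by
          have : List.dropWhile p cs = x :: ys := by rw [← ht, hys]
          simp [this]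
        rwa [h2] at hh
      simp [hxf]
  rw [hls, List.reverse_reverse, List.dropWhile_idempotent]

theorem pv_strip_idem (s : String) :
    PySem.Str.strip (PySem.Str.strip s) = PySem.Str.strip s := by
  apply String.toList_inj.mp
  simp [pv_chars_strip_idem]

theorem pvFlushA_decomp (secs : List (Option String × String)) (nm : Option String)
    (cur : List String) : pvFlushA secs nm cur = secs ++ pvFlushA [] nm cur := by
  unfold pvFlushA; split <;> simp

-- sections already emitted are only prepended to by the loop
theorem pv_foldA_decomp (lines : List String) (secs : List (Option String × String))
    (nm : Option String) (cur : List String) (f : Bool) :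
    lines.foldl pvStepA (secs, nm, cur, f) =
      (secs ++ (lines.foldl pvStepA ([], nm, cur, f)).1,
        (lines.foldl pvStepA ([], nm, cur, f)).2) := by
  induction lines generalizing secs nm cur f with
  | nil => simp
  | cons l rest ih =>
    simp only [List.foldl_cons]
    cases hm : PySem.Str.startswith l "# Sheet: " with
    | true =>
      simp only [pvStepA, hm, if_true]
      rw [pvFlushA_decomp secs nm cur,
        ih (secs ++ pvFlushA [] nm cur), ih (pvFlushA [] nm cur)]
      simp
    | false =>
      simp only [pvStepA, hm, Bool.false_eq_true, if_false]
      rw [ih secs, ih []]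

-- the found flag records whether any marker line occurred
theorem pv_foldA_found (lines : List String) (secs : List (Option String × String))
    (nm : Option String) (cur : List String) (f : Bool) :
    (lines.foldl pvStepA (secs, nm, cur, f)).2.2.2 = (f || lines.any pvIsMarker) := by
  induction lines generalizing secs nm cur f with
  | nil => simp
  | cons l rest ih =>
    simp only [List.foldl_cons, List.any_cons]
    cases hm : PySem.Str.startswith l "# Sheet: " with
    | true =>
      simp only [pvStepA, hm, if_true, ih]
      simp only [pvIsMarker, hm, Bool.true_or, Bool.or_true]
    | false =>
      simp only [pvStepA, hm, Bool.false_eq_true, if_false, ih]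
      simp only [pvIsMarker, hm, Bool.false_or]

theorem pv_filter_flush (nm : Option String) (cur : List String) :
    (pvFlushA [] nm cur).filter (fun p => decide (PySem.Str.strip p.2 ≠ "")) =
      (if PySem.Str.strip (PySem.Str.join "\n" cur) ≠ ""
        then [(nm, PySem.Str.strip (PySem.Str.join "\n" cur))] else []) := by
  unfold pvFlushA
  cases cur with
  | nil =>
    simp only [ne_eq, not_true_eq_false, if_false, List.filter_nil]
    have : PySem.Str.strip (PySem.Str.join "\n" []) = "" := by decide
    simp [this]
  | cons c cs =>
    simp only [ne_eq, reduceCtorEq, not_false_eq_true, if_true, List.filter_append,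
      List.filter_cons, List.filter_nil]
    rw [pv_strip_idem]
    split <;> simp_all

theorem pv_main (lines : List String) (nm : Option String) (cur : List String) (f : Bool)
    (hcur : ∀ l ∈ cur, pvIsMarker l = false) :
    (pvFlushA (lines.foldl pvStepA ([], nm, cur, f)).1
        (lines.foldl pvStepA ([], nm, cur, f)).2.1
        (lines.foldl pvStepA ([], nm, cur, f)).2.2.1).filter
        (fun p => decide (PySem.Str.strip p.2 ≠ "")) =
      pvSections nm (cur ++ lines) := by
  induction lines generalizing nm cur f with
  | nil =>
    simp only [List.foldl_nil, List.append_nil]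
    rw [pv_filter_flush, pvSections]
    rw [List.takeWhile_eq_self_iff.mpr (by intro x hx; simp [hcur x hx]),
      List.dropWhile_eq_nil_iff.mpr (by intro x hx; simp [hcur x hx])]
  | cons l rest ih =>
    simp only [List.foldl_cons]
    cases hm : pvIsMarker l with
    | false =>
      have hm' : PySem.Str.startswith l "# Sheet: " = false := hm
      simp only [pvStepA, hm', Bool.false_eq_true, if_false]
      have hcur' : ∀ x ∈ cur ++ [l], pvIsMarker x = false := by
        intro x hx
        rcases List.mem_append.mp hx with h | h
        · exact hcur x h
        · simp at h; subst h; exact hm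
      have := ih nm (cur ++ [l]) f hcur'
      simpa using this
    | true =>
      have hm' : PySem.Str.startswith l "# Sheet: " = true := hm
      simp only [pvStepA, hm', if_true]
      rw [show (if PySem.Str.strip (PySem.Str.slice l (some 9)) = "" then none
          else some (PySem.Str.strip (PySem.Str.slice l (some 9)))) = pvParseName l from rfl]
      rw [pv_foldA_decomp]
      dsimp only
      rw [pvFlushA_decomp (pvFlushA [] nm cur ++
        (List.foldl pvStepA ([], pvParseName l, [], true) rest).1)]
      rw [List.append_assoc,
        ← pvFlushA_decomp (List.foldl pvStepA ([], pvParseName l, [], true) rest).1]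
      rw [List.filter_append, pv_filter_flush]
      have hrec := ih (pvParseName l) [] true (by simp)
      simp only [List.nil_append] at hrec
      rw [hrec]
      -- right-hand side
      have hp : ∀ x ∈ cur, (fun ln => !pvIsMarker ln) x = true := by
        intro x hx; simp [hcur x hx]
      conv_rhs => rw [pvSections, List.takeWhile_append_of_pos hp,
        List.dropWhile_append_of_pos hp]
      simp only [List.takeWhile_cons, hm, Bool.not_true, Bool.false_eq_true, if_false,
        List.append_nil]
      have hd : List.dropWhile (fun ln => !pvIsMarker ln) (l :: rest) = l :: rest := by
        simp [hm]
      split <;>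
        (split
         · next heq => rw [hd] at heq; cases heq
         · next mline tail heq => rw [hd] at heq; cases heq; rfl)

-- ===== VERDICT (by name: the statement is the Claim_ definition above) =====
theorem split_sheet_sections_spec : Claim_equal_split_sheet_sections := by
  intro text _
  unfold Spec_split_sheet_sections split_sheet_sections split_sheet_sections_alt
  dsimp only
  have hf := pv_foldA_found (PySem.Str.splitlines text) [] none [] false
  simp only [Bool.false_or] at hf
  cases hany : (PySem.Str.splitlines text).any pvIsMarker with
  | false =>
    rw [hany] at hf
    simp [hf]
  | true =>
    rw [hany] at hf
    have hmain := pv_main (PySem.Str.splitlines text) none [] false (by simp)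
    simp only [List.nil_append] at hmain
    simp only [hf, Bool.true_eq_false, if_false, Bool.not_true, Bool.false_eq_true]
    exact hmain
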